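-- pv_equiv track=rewrite | github.com/boukeas/aoc-2023 | 13/solution13_01.py | is_reflection
-- ===== SOURCE A (Python) =====
-- def is_reflection(numbers, length, axis):
--     """
--     Given a set of `numbers` (that represent # positions) and
--     the `length` of a line (the maximum possible number), return
--     True if the numbers are symmetrical around the `axis` position
--     and False otherwise.
--
--     A pair of numbers is symmetric with respect to the `axis` position
--     if they are equidistant from the axis and they are *both* either
--     in the iterable of numbers or not.
--
--     For example: the `numbers` for a line such as "#.##..##." are
--     [0, 2, 3, 6, 7]. There is no reflection (no symmetry) around axis
--     position 4, but there is around axis position 5.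
--     ```
--     >>> is_reflection([0, 2, 3, 6, 7], 9, 4)
--     False
--     >>> is_reflection([0, 2, 3, 6, 7], 9, 5)
--     True
--     ```
--     """
--     left = axis - 1
--     right = axis
--     while left >= 0 and right < length:
--         reflection = not ((left in numbers) ^ (right in numbers))
--         if not reflection:
--             return False
--         left -= 1
--         right += 1
--     return True
-- ===== SOURCE B (Python) =====
-- def is_reflection(numbers, length, axis):
--     m = min(axis, length - axis)
--     window = {x for x in numbers if axis - m <= x < axis + m}
--     return {2 * axis - 1 - x for x in window} == window
-- ===== Notes on version B (the rewrite author's own statement) =====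
-- stated objective: alternative
-- what changed: Replaces A's outward two-pointer while-loop over positions with a build-then-compare strategy: compute the half-width m of the overlap, collect the set of numbers inside the window [axis-m, axis+m), reflect that set through the axis, and return whether the reflected set equals the original.
import Mathlib
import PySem

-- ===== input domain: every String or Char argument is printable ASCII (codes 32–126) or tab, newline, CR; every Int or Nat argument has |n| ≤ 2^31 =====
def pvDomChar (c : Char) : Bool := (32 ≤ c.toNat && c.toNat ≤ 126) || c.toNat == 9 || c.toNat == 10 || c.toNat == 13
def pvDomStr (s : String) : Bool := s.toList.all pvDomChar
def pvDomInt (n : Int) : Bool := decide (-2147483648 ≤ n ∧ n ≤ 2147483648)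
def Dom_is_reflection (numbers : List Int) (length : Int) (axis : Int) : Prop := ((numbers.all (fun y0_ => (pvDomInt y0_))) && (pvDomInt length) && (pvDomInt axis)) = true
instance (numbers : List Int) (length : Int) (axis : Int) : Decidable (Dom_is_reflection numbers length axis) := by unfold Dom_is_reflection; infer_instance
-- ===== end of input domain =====

-- B replaces A's outward two-pointer scan with a build-window-set-then-compare-with-its-reflection
-- strategy (objective: alternative, same asymptotic cost).

-- ===== PORT A =====
-- the while-loop of A: left walks down, right walks up
def isReflLoopA (numbers : List Int) (length : Int) (left right : Int) : Bool :=
  if 0 ≤ left ∧ right < length then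
    if (numbers.contains left) == (numbers.contains right) then
      isReflLoopA numbers length (left - 1) (right + 1)
    else false
  else true
termination_by (left + 1).toNat
decreasing_by omega

def is_reflection (numbers : List Int) (length : Int) (axis : Int) : Bool :=
  isReflLoopA numbers length (axis - 1) axis

-- ===== PORT B =====
def is_reflection_alt (numbers : List Int) (length : Int) (axis : Int) : Bool :=
  let m := min axis (length - axis)
  let window : PySem.Set Int :=
    PySem.Set.ofList (numbers.filter (fun x => decide (axis - m ≤ x ∧ x < axis + m)))
  PySem.Set.equal (PySem.Set.ofList (window.map (fun x => 2 * axis - 1 - x))) window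

-- ===== PRECONDITION & SPEC =====
def Spec_is_reflection (numbers : List Int) (length : Int) (axis : Int) (out : Bool) : Prop := out = is_reflection_alt numbers length axis
instance (numbers : List Int) (length : Int) (axis : Int) (out : Bool) : Decidable (Spec_is_reflection numbers length axis out) := by unfold Spec_is_reflection; infer_instance

-- ===== CLAIM (what is proved, stated in full; the proofs are below) =====
def Claim_equal_is_reflection : Prop := ∀ (numbers : List Int) (length : Int) (axis : Int), Dom_is_reflection numbers length axis → Spec_is_reflection numbers length axis (is_reflection numbers length axis)

-- ===== LEMMAS AND PROOFS =====

-- A's loop returns true iff every checked pair matches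
theorem isReflLoopA_iff (numbers : List Int) (length : Int) :
    ∀ (k : Nat) (left right : Int), (left + 1).toNat ≤ k →
      (isReflLoopA numbers length left right = true ↔
        ∀ j : Int, 0 ≤ j → 0 ≤ left - j → right + j < length →
          numbers.contains (left - j) = numbers.contains (right + j)) := by
  intro k
  induction k with
  | zero =>
    intro left right hk
    rw [isReflLoopA]
    have hneg : ¬ (0 ≤ left ∧ right < length) := by omega
    simp only [if_neg hneg, true_iff]
    intro j hj hl _
    omega
  | succ k ih =>
    intro left right hk
    rw [isReflLoopA]
    by_cases h : 0 ≤ left ∧ right < length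
    · simp only [if_pos h]
      by_cases heq : numbers.contains left = numbers.contains right
      · have hbeq : (numbers.contains left == numbers.contains right) = true := by
          rw [heq]; cases numbers.contains right <;> rfl
        simp only [hbeq, if_true]
        rw [ih (left - 1) (right + 1) (by omega)]
        constructor
        · intro hall j hj hl hr
          by_cases hj0 : j = 0
          · subst hj0; rw [sub_zero, add_zero]; exact heq
          · have := hall (j - 1) (by omega) (by omega) (by omega)
            have e1 : left - 1 - (j - 1) = left - j := by ring
            have e2 : right + 1 + (j - 1) = right + j := by ring
            rwa [e1, e2] at this
        · intro hall j hj hl hr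
          have := hall (j + 1) (by omega) (by omega) (by omega)
          have e1 : left - (j + 1) = left - 1 - j := by ring
          have e2 : right + (j + 1) = right + 1 + j := by ring
          rwa [e1, e2] at this
      · have hbeq : (numbers.contains left == numbers.contains right) = false := by
          cases hl : numbers.contains left <;> cases hr : numbers.contains right <;> simp_all
        simp only [hbeq]
        constructor
        · intro hfalse; exact absurd hfalse (by simp)
        · intro hall
          have h0 := hall 0 le_rfl (by omega) (by omega)
          rw [sub_zero, add_zero] at h0
          exact absurd h0 heq
    · simp only [if_neg h, true_iff]
      intro j hj hl hr
      omega

-- pair condition in terms of the half-width m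
theorem isReflection_iff (numbers : List Int) (length : Int) (axis : Int) :
    is_reflection numbers length axis = true ↔
      ∀ j : Int, 0 ≤ j → j < min axis (length - axis) →
        numbers.contains (axis - 1 - j) = numbers.contains (axis + j) := by
  unfold is_reflection
  rw [isReflLoopA_iff numbers length (axis - 1 + 1).toNat (axis - 1) axis le_rfl]
  constructor
  · intro hall j hj hjm
    exact hall j hj (by omega) (by omega)
  · intro hall j hj hl hr
    exact hall j hj (by omega)

theorem isReflectionAlt_iff (numbers : List Int) (length : Int) (axis : Int) :
    is_reflection_alt numbers length axis = true ↔
      ∀ x : Int, axis - min axis (length - axis) ≤ x → x < axis + min axis (length - axis) →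
        ((2 * axis - 1 - x) ∈ numbers ↔ x ∈ numbers) := by
  unfold is_reflection_alt
  set m := min axis (length - axis) with hm
  rw [PySem.Set.equal_iff]
  constructor
  · intro hall x hx1 hx2
    have := hall x
    simp only [PySem.Set.mem_ofList, List.mem_map, List.mem_filter, decide_eq_true_eq] at this
    constructor
    · intro hmem
      rcases this.mp ⟨2 * axis - 1 - x, ⟨hmem, by omega⟩, by ring⟩ with ⟨h1, _⟩
      exact h1
    · intro hmem
      rcases this.mpr ⟨hmem, by omega⟩ with ⟨y, ⟨hy1, _, _⟩, hy3⟩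
      have : y = 2 * axis - 1 - x := by omega
      subst this; exact hy1
  · intro hall x
    simp only [PySem.Set.mem_ofList, List.mem_map, List.mem_filter, decide_eq_true_eq]
    constructor
    · rintro ⟨y, ⟨hy1, hy2, hy3⟩, rfl⟩
      refine ⟨?_, by omega, by omega⟩
      have : y = 2 * axis - 1 - (2 * axis - 1 - y) := by ring
      rw [this] at hy1
      exact (hall (2 * axis - 1 - y) (by omega) (by omega)).mp hy1
    · rintro ⟨hx1, hx2, hx3⟩
      exact ⟨2 * axis - 1 - x, ⟨(hall x hx2 hx3).mpr hx1, by omega, by omega⟩, by ring⟩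

theorem both_agree (numbers : List Int) (length : Int) (axis : Int) :
    is_reflection numbers length axis = is_reflection_alt numbers length axis := by
  have hA := isReflection_iff numbers length axis
  have hB := isReflectionAlt_iff numbers length axis
  set m := min axis (length - axis) with hm
  have hc : ∀ a : Int, numbers.contains a = decide (a ∈ numbers) := fun a => by
    by_cases h : a ∈ numbers <;> simp [h]
  have key : (∀ j : Int, 0 ≤ j → j < m →
        numbers.contains (axis - 1 - j) = numbers.contains (axis + j)) ↔
      (∀ x : Int, axis - m ≤ x → x < axis + m →
        ((2 * axis - 1 - x) ∈ numbers ↔ x ∈ numbers)) := by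
    constructor
    · intro hall x hx1 hx2
      by_cases hx : axis ≤ x
      · have := hall (x - axis) (by omega) (by omega)
        have e1 : axis - 1 - (x - axis) = 2 * axis - 1 - x := by ring
        have e2 : axis + (x - axis) = x := by ring
        rw [e1, e2, hc, hc, decide_eq_decide] at this
        exact this
      · have := hall (axis - 1 - x) (by omega) (by omega)
        have e1 : axis - 1 - (axis - 1 - x) = x := by ring
        have e2 : axis + (axis - 1 - x) = 2 * axis - 1 - x := by ring
        rw [e1, e2, hc, hc, decide_eq_decide] at this
        exact this.symm
    · intro hall j hj hjm
      have := hall (axis + j) (by omega) (by omega)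
      have e : 2 * axis - 1 - (axis + j) = axis - 1 - j := by ring
      rw [e] at this
      rw [hc, hc, decide_eq_decide]
      exact this
  by_cases hb : is_reflection_alt numbers length axis = true
  · rw [hb, hA]
    exact key.mpr (hB.mp hb)
  · rw [Bool.not_eq_true] at hb
    rw [hb]
    by_cases ha : is_reflection numbers length axis = true
    · exfalso
      have halt : is_reflection_alt numbers length axis = true := hB.mpr (key.mp (hA.mp ha))
      rw [hb] at halt
      exact Bool.false_ne_true halt
    · rwa [Bool.not_eq_true] at ha

-- ===== VERDICT (by name: the statement is the Claim_ definition above) =====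
theorem is_reflection_spec : Claim_equal_is_reflection := by
  intro numbers length axis _
  unfold Spec_is_reflection
  exact both_agree numbers length axis
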